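-- pv_equiv track=rewrite | github.com/rajeevsubbian/AOC-2024 | _utils.py | search_one_direction
-- ===== SOURCE A (Python) =====
-- def search_one_direction(matrix, chars, coords, direction):
--     coords_c = coords.copy()
--     for c in chars:
--         coords_c[0] += direction[0]
--         coords_c[1] += direction[1]
--         if coords_c[0] >= 0 and coords_c[0] < len(matrix) and coords_c[1] >= 0 and coords_c[1] < len(matrix):
--             found = c == matrix[coords_c[0]][coords_c[1]]
--         else:
--             return False
--         if not found:
--             return False
--     return True
-- ===== SOURCE B (Python) =====
-- def search_one_direction(matrix, chars, coords, direction):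
--     # staged passes: build the whole coordinate path, reject it if any cell
--     # is outside the len(matrix) x len(matrix) box, then extract the word
--     # along the path and compare it to chars wholesale (no early exit).
--     L = len(matrix)
--     path = [(coords[0] + direction[0] * i, coords[1] + direction[1] * i)
--             for i in range(1, len(chars) + 1)]
--     if any(not (0 <= r < L and 0 <= c < L) for r, c in path):
--         return False
--     return [matrix[r][c] for r, c in path] == chars
-- ===== Notes on version B (the rewrite author's own statement) =====
-- stated objective: alternative
-- what changed: A is a single stateful walk that mutates a position, bounds-checks each step inside the loop and early-returns on the first mismatch; B has no walk and no early mismatch exit: it builds the full coordinate path as a list, rejects it with one any() bounds pass, then extracts the whole word along the path and compares it to chars wholesale with list equality.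
-- outside the precondition, e.g. on search_one_direction([['a', 'b'], ['c']], ['x', 'y'], [-1, -1], [1, 1]): A returns False, B raises IndexError
import Mathlib
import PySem

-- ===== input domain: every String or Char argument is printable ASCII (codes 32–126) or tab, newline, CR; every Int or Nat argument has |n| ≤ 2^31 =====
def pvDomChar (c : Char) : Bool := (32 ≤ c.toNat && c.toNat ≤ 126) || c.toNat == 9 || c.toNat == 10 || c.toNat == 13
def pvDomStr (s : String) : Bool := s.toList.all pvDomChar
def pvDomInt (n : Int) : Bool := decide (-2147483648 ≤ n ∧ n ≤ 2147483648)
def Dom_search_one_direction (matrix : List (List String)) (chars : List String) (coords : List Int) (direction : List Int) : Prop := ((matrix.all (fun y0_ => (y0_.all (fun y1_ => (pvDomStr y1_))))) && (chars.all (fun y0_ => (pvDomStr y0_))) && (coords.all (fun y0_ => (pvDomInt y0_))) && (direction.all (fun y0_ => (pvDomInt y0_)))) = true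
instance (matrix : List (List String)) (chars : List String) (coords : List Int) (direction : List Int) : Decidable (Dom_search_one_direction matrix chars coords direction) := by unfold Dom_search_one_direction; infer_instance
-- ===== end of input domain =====

-- B replaces A's stateful step-by-step walk (per-step bounds check, early return on first
-- mismatch) by staged passes: build the whole coordinate path, one bounds pass over it, then
-- extract the whole word and compare it to chars wholesale. Objective: alternative (same cost,
-- different shape). Return-value equivalence only (A copies `coords`, so neither side mutates).

-- ===== PORT A =====
-- A's loop: state is the mutable list coords_c; each iteration reads/writes indices 0 and 1.
def pvWalkA (matrix : List (List String)) (direction : List Int) : List String → List Int → Bool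
  | [], _ => true
  | ch :: rest, cc =>
    match PySem.List.pyGet? cc 0, PySem.List.pyGet? direction 0 with
    | some a, some d0 =>
      -- coords_c[0] += direction[0]: the write at index 0 succeeds because the read did
      let cc1 := cc.set 0 (a + d0)
      match PySem.List.pyGet? cc1 1, PySem.List.pyGet? direction 1 with
      | some b, some d1 =>
        let cc2 := cc1.set 1 (b + d1)
        match PySem.List.pyGet? cc2 0, PySem.List.pyGet? cc2 1 with
        | some r, some c =>
          if 0 ≤ r ∧ r < (matrix.length : Int) ∧ 0 ≤ c ∧ c < (matrix.length : Int) then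
            match PySem.List.pyGet? matrix r with
            | some row =>
              match PySem.List.pyGet? row c with
              | some cell =>
                -- Python's 'c == cell' on str, compared on code points (kernel-computable)
                if ch.toList = cell.toList then pvWalkA matrix direction rest cc2 else false
              | none => false  -- Python raises IndexError (row shorter than len(matrix)); outside Pre_
            | none => false    -- unreachable under the bounds check
          else false
        | _, _ => false
      | _, _ => false
    | _, _ => false          -- Python raises IndexError (coords/direction shorter than 2); outside Pre_

def search_one_direction (matrix : List (List String)) (chars : List String) (coords : List Int) (direction : List Int) : Bool :=
  pvWalkA matrix direction chars coords

-- ===== PORT B =====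
-- extraction of one cell: matrix[r][c]; none = Python IndexError (outside Pre_)
def pvExt (matrix : List (List String)) (rc : Int × Int) : Option String :=
  (PySem.List.pyGet? matrix rc.1).bind (fun row => PySem.List.pyGet? row rc.2)

def search_one_direction_alt (matrix : List (List String)) (chars : List String) (coords : List Int) (direction : List Int) : Bool :=
  match chars with
  | [] => true   -- path = [], the any() pass is vacuous, [] == [] is True (no index is read)
  | _ :: _ =>
    -- the comprehension reads coords[0], coords[1], direction[0], direction[1] (pure reads,
    -- hoisted once here); none = Python IndexError, outside Pre_
    match PySem.List.pyGet? coords 0, PySem.List.pyGet? coords 1,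
          PySem.List.pyGet? direction 0, PySem.List.pyGet? direction 1 with
    | some r0, some c0, some d0, some d1 =>
      let L : Int := matrix.length
      let path := (PySem.List.pyRange 1 ((chars.length : Int) + 1) 1).map
        (fun i => (r0 + d0 * i, c0 + d1 * i))
      if path.any (fun rc => decide (¬ (0 ≤ rc.1 ∧ rc.1 < L ∧ 0 ≤ rc.2 ∧ rc.2 < L))) then false
      else
        match path.mapM (pvExt matrix) with
        | some word => decide (word.map String.toList = chars.map String.toList)
        | none => false   -- Python raises IndexError (row shorter than len(matrix)); outside Pre_
    | _, _, _, _ => false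
-- ===== PRECONDITION & SPEC =====
-- Pre_ excludes the inputs where the in-box part of the path contains a cell whose row is
-- shorter than len(matrix): there Python B's extraction pass raises IndexError (and Python A
-- either raises too or, when an earlier character mismatch returns first, returns False — those
-- few returning inputs are excluded with it, see the cite). It also requires coords/direction
-- of length ≥ 2 when chars is nonempty (otherwise both Pythons raise IndexError reading them).
def Pre_search_one_direction (matrix : List (List String)) (chars : List String) (coords : List Int) (direction : List Int) : Prop :=
  chars = [] ∨
  (2 ≤ coords.length ∧ 2 ≤ direction.length ∧
   ∀ i : Nat, i < chars.length →
     (0 ≤ coords.getD 0 0 + direction.getD 0 0 * ((i + 1 : Nat) : Int) ∧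
      coords.getD 0 0 + direction.getD 0 0 * ((i + 1 : Nat) : Int) < (matrix.length : Int) ∧
      0 ≤ coords.getD 1 0 + direction.getD 1 0 * ((i + 1 : Nat) : Int) ∧
      coords.getD 1 0 + direction.getD 1 0 * ((i + 1 : Nat) : Int) < (matrix.length : Int)) →
     coords.getD 1 0 + direction.getD 1 0 * ((i + 1 : Nat) : Int) <
       ((matrix.getD (coords.getD 0 0 + direction.getD 0 0 * ((i + 1 : Nat) : Int)).toNat []).length : Int))
instance (matrix : List (List String)) (chars : List String) (coords : List Int) (direction : List Int) : Decidable (Pre_search_one_direction matrix chars coords direction) := by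
  unfold Pre_search_one_direction; infer_instance

def pvWitness_search_one_direction : List (List String) × List String × List Int × List Int :=
  ([["a", "b"], ["c", "d"]], ["c"], [0, 0], [1, 0])

def Spec_search_one_direction (matrix : List (List String)) (chars : List String) (coords : List Int) (direction : List Int) (out : Bool) : Prop := out = search_one_direction_alt matrix chars coords direction
instance (matrix : List (List String)) (chars : List String) (coords : List Int) (direction : List Int) (out : Bool) : Decidable (Spec_search_one_direction matrix chars coords direction out) := by unfold Spec_search_one_direction; infer_instance

-- ===== CLAIM (what is proved, stated in full; the proofs are below) =====
def Claim_equal_search_one_direction : Prop := ∀ (matrix : List (List String)) (chars : List String) (coords : List Int) (direction : List Int), Dom_search_one_direction matrix chars coords direction → Pre_search_one_direction matrix chars coords direction → Spec_search_one_direction matrix chars coords direction (search_one_direction matrix chars coords direction)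

-- ===== LEMMAS AND PROOFS =====

-- proof-side shorthand for the in-the-box condition of both programs
def pvInB (matrix : List (List String)) (r c : Int) : Prop :=
  0 ≤ r ∧ r < (matrix.length : Int) ∧ 0 ≤ c ∧ c < (matrix.length : Int)

lemma pvPg0 {α : Type} (x y : α) (t : List α) : PySem.List.pyGet? (x :: y :: t) 0 = some x := by
  have h : (0 : Int) ≤ (t.length : Int) + 1 := by omega
  simp [PySem.List.pyGet?, PySem.List.pyIdx?, h]

lemma pvPg1 {α : Type} (x y : α) (t : List α) : PySem.List.pyGet? (x :: y :: t) 1 = some y := by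
  simp [PySem.List.pyGet?, PySem.List.pyIdx?]

lemma pvPgSome {α : Type} (xs : List α) (i : Int) (h0 : 0 ≤ i) (h1 : i < (xs.length : Int)) :
    ∃ v, PySem.List.pyGet? xs i = some v := by
  simp [PySem.List.pyGet?, PySem.List.pyIdx?, h0, h1]

-- if some step of the remaining path is outside the box, A's walk returns false
lemma pvWalkA_false (matrix : List (List String)) (d0 d1 : Int) (dt : List Int) :
    ∀ (cs : List String) (a b : Int) (t : List Int),
      (∃ i : Nat, i < cs.length ∧ ¬ pvInB matrix (a + d0 * ((i + 1 : Nat) : Int)) (b + d1 * ((i + 1 : Nat) : Int))) →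
      pvWalkA matrix (d0 :: d1 :: dt) cs (a :: b :: t) = false := by
  intro cs
  induction cs with
  | nil => rintro a b t ⟨i, hi, -⟩; exact absurd hi (by simp)
  | cons ch rest ih =>
    rintro a b t ⟨i, hi, hnb⟩
    simp only [List.length_cons] at hi
    simp only [pvWalkA, pvPg0, pvPg1, List.set]
    by_cases hb : 0 ≤ a + d0 ∧ a + d0 < (matrix.length : Int) ∧ 0 ≤ b + d1 ∧ b + d1 < (matrix.length : Int)
    · obtain ⟨hb0, hb1, hb2, hb3⟩ := hb
      obtain ⟨row, hrow⟩ := pvPgSome matrix (a + d0) hb0 hb1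
      rw [if_pos ⟨hb0, hb1, hb2, hb3⟩, hrow]
      have hi' : 1 ≤ i := by
        rcases Nat.eq_zero_or_pos i with h | h
        · exfalso; apply hnb; subst h
          refine ⟨by simpa using hb0, by simpa using hb1, by simpa using hb2, by simpa using hb3⟩
        · exact h
      cases hcell : PySem.List.pyGet? row (b + d1) with
      | none => simp only [hcell]
      | some cell =>
        simp only [hcell]
        by_cases hch : ch.toList = cell.toList
        · rw [if_pos hch]
          apply ih
          refine ⟨i - 1, by omega, ?_⟩
          have e1 : a + d0 + d0 * ((i - 1 + 1 : Nat) : Int) = a + d0 * ((i + 1 : Nat) : Int) := by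
            have : ((i - 1 + 1 : Nat) : Int) = ((i + 1 : Nat) : Int) - 1 := by omega
            rw [this]; push_cast; ring
          have e2 : b + d1 + d1 * ((i - 1 + 1 : Nat) : Int) = b + d1 * ((i + 1 : Nat) : Int) := by
            have : ((i - 1 + 1 : Nat) : Int) = ((i + 1 : Nat) : Int) - 1 := by omega
            rw [this]; push_cast; ring
          rw [e1, e2]; exact hnb
        · rw [if_neg hch]
    · rw [if_neg hb]

-- if every step of the remaining path is inside the box, A's walk equals B's
-- extract-then-compare on the remaining path
lemma pvWalkA_eq_words (matrix : List (List String)) (r0 c0 d0 d1 : Int) (dt : List Int) :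
    ∀ (cs : List String) (kk : Int) (t : List Int),
      (∀ i : Nat, i < cs.length →
        pvInB matrix (r0 + d0 * (kk + 1 + (i : Int))) (c0 + d1 * (kk + 1 + (i : Int)))) →
      pvWalkA matrix (d0 :: d1 :: dt) cs ((r0 + d0 * kk) :: (c0 + d1 * kk) :: t)
        = match ((List.range cs.length).map
              (fun i : Nat => (r0 + d0 * (kk + 1 + (i : Int)), c0 + d1 * (kk + 1 + (i : Int))))).mapM (pvExt matrix) with
          | some word => decide (word.map String.toList = cs.map String.toList)
          | none => false := by
  intro cs
  induction cs with
  | nil => intro kk t _; rfl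
  | cons ch rest ih =>
    intro kk t hall
    have hstep : pvInB matrix (r0 + d0 * (kk + 1)) (c0 + d1 * (kk + 1)) := by
      have h := hall 0 (by simp)
      have e : kk + 1 + ((0 : Nat) : Int) = kk + 1 := by push_cast; ring
      rwa [e] at h
    obtain ⟨h0, h1, h2, h3⟩ := hstep
    obtain ⟨row, hrow⟩ := pvPgSome matrix _ h0 h1
    -- LHS: one step of A's walk
    simp only [pvWalkA, pvPg0, pvPg1, List.set]
    have er : r0 + d0 * kk + d0 = r0 + d0 * (kk + 1) := by ring
    have ec : c0 + d1 * kk + d1 = c0 + d1 * (kk + 1) := by ring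
    rw [er, ec, if_pos ⟨h0, h1, h2, h3⟩, hrow]
    -- RHS: peel the head of the range
    simp only [List.length_cons]
    rw [List.range_succ_eq_map]
    simp only [List.map_cons, List.map_map, List.mapM_cons]
    have ehd : pvExt matrix (r0 + d0 * (kk + 1 + ((0 : Nat) : Int)), c0 + d1 * (kk + 1 + ((0 : Nat) : Int)))
        = PySem.List.pyGet? row (c0 + d1 * (kk + 1)) := by
      simp only [Nat.cast_zero, add_zero]
      simp [pvExt, hrow]
    rw [ehd]
    have etail : (List.range rest.length).map
          ((fun i : Nat => (r0 + d0 * (kk + 1 + (i : Int)), c0 + d1 * (kk + 1 + (i : Int)))) ∘ Nat.succ)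
        = (List.range rest.length).map
          (fun i : Nat => (r0 + d0 * (kk + 1 + 1 + (i : Int)), c0 + d1 * (kk + 1 + 1 + (i : Int)))) := by
      refine List.map_congr_left ?_
      intro k _
      simp only [Function.comp]
      have e : kk + 1 + ((Nat.succ k : Nat) : Int) = kk + 1 + 1 + (k : Int) := by push_cast; ring
      rw [e]
    rw [etail]
    have htail : ∀ i : Nat, i < rest.length →
        pvInB matrix (r0 + d0 * (kk + 1 + 1 + (i : Int))) (c0 + d1 * (kk + 1 + 1 + (i : Int))) := by
      intro i hi
      have h := hall (i + 1) (by simpa using Nat.succ_lt_succ hi)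
      have e : kk + 1 + ((i + 1 : Nat) : Int) = kk + 1 + 1 + (i : Int) := by push_cast; ring
      rwa [e] at h
    have IH := ih (kk + 1) t htail
    cases hcell : PySem.List.pyGet? row (c0 + d1 * (kk + 1)) with
    | none => simp
    | some cell =>
      by_cases hch : ch.toList = cell.toList
      · cases hm : ((List.range rest.length).map
            (fun i : Nat => (r0 + d0 * (kk + 1 + 1 + (i : Int)), c0 + d1 * (kk + 1 + 1 + (i : Int))))).mapM (pvExt matrix) with
        | none => simp [hch, IH, hm]
        | some word => simp [hch, IH, hm]
      · have hch' : ¬ cell.toList = ch.toList := fun h => hch h.symm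
        cases hm : ((List.range rest.length).map
            (fun i : Nat => (r0 + d0 * (kk + 1 + 1 + (i : Int)), c0 + d1 * (kk + 1 + 1 + (i : Int))))).mapM (pvExt matrix) with
        | none => simp [hch]
        | some word => simp [hch, hch']

-- B's path is the range-indexed step list
lemma pvPath_eq (r0 c0 d0 d1 : Int) (n : Nat) :
    (PySem.List.pyRange 1 ((n : Int) + 1) 1).map (fun i => (r0 + d0 * i, c0 + d1 * i))
      = (List.range n).map
          (fun i : Nat => (r0 + d0 * (0 + 1 + (i : Int)), c0 + d1 * (0 + 1 + (i : Int)))) := by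
  rw [PySem.List.pyRange_one]
  have hn : (((n : Int) + 1 - 1).toNat) = n := by omega
  rw [hn, List.map_map]
  refine List.map_congr_left ?_
  intro k _
  simp only [Function.comp]
  norm_num

-- ===== VERDICT (by name: the statement is the Claim_ definition above) =====
theorem search_one_direction_spec : Claim_equal_search_one_direction := by
  intro matrix chars coords direction _ hpre
  unfold Spec_search_one_direction search_one_direction search_one_direction_alt
  cases chars with
  | nil => rfl
  | cons ch rest =>
    rcases hpre with h | ⟨hco, hdi, -⟩
    · exact absurd h (by simp)
    · obtain ⟨r0, co1, hco1⟩ : ∃ x xs, coords = x :: xs := by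
        cases coords with
        | nil => simp at hco
        | cons x xs => exact ⟨x, xs, rfl⟩
      obtain ⟨c0, cot, hcot⟩ : ∃ x xs, co1 = x :: xs := by
        cases co1 with
        | nil => subst hco1; simp at hco
        | cons x xs => exact ⟨x, xs, rfl⟩
      obtain ⟨d0, di1, hdi1⟩ : ∃ x xs, direction = x :: xs := by
        cases direction with
        | nil => simp at hdi
        | cons x xs => exact ⟨x, xs, rfl⟩
      obtain ⟨d1, dit, hdit⟩ : ∃ x xs, di1 = x :: xs := by
        cases di1 with
        | nil => subst hdi1; simp at hdi
        | cons x xs => exact ⟨x, xs, rfl⟩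
      subst hco1; subst hcot; subst hdi1; subst hdit
      simp only [pvPg0, pvPg1]
      rw [pvPath_eq r0 c0 d0 d1 (ch :: rest).length]
      by_cases hany : ∃ i : Nat, i < (ch :: rest).length ∧
          ¬ pvInB matrix (r0 + d0 * (0 + 1 + (i : Int))) (c0 + d1 * (0 + 1 + (i : Int)))
      · -- some step outside the box: B's any() pass fires, A's walk is false
        obtain ⟨i, hi, hnb⟩ := hany
        rw [if_pos ?hA]
        case hA =>
          rw [List.any_eq_true]
          refine ⟨_, List.mem_map_of_mem (List.mem_range.mpr hi), ?_⟩
          exact decide_eq_true hnb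
        apply pvWalkA_false
        refine ⟨i, hi, ?_⟩
        have e1 : r0 + d0 * ((i + 1 : Nat) : Int) = r0 + d0 * (0 + 1 + (i : Int)) := by push_cast; ring
        have e2 : c0 + d1 * ((i + 1 : Nat) : Int) = c0 + d1 * (0 + 1 + (i : Int)) := by push_cast; ring
        rw [e1, e2]; exact hnb
      · -- every step inside the box: both sides extract-and-compare
        push Not at hany
        rw [if_neg ?hB]
        case hB =>
          rw [List.any_eq_true]
          rintro ⟨rc, hmem, hrc⟩
          rw [List.mem_map] at hmem
          obtain ⟨k, hk, rfl⟩ := hmem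
          have hx := of_decide_eq_true hrc
          exact hx (hany k (List.mem_range.mp hk))
        have hall : ∀ i : Nat, i < (ch :: rest).length →
            pvInB matrix (r0 + d0 * ((0 : Int) + 1 + (i : Int))) (c0 + d1 * ((0 : Int) + 1 + (i : Int))) :=
          fun i hi => hany i hi
        have H := pvWalkA_eq_words matrix r0 c0 d0 d1 dit (ch :: rest) 0 cot hall
        have e0 : r0 + d0 * (0 : Int) = r0 := by ring
        have e0' : c0 + d1 * (0 : Int) = c0 := by ring
        rw [e0, e0'] at H
        exact H
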